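-- pv_equiv track=rewrite | github.com/Rafael-Sapienza/computacao | programas/1Semestre/XI_Maratona_Unb_Programacao/problema_M_v0.py | findMaxAtaque
-- ===== SOURCE A (Python) =====
-- import copy
--
-- def findMaxAtaque(indexesAtaques, ataques):
--     def findAtaqueValue(indexesAtaques, ataques, k):
--         index = indexesAtaques[k]
--         ataqueValue = 0
--         for i in range(len(index)):
--             r = index[i]
--             if r or r==0:
--                 ataqueValue += ataques[i][r]
--         return ataqueValue
--
--     valoresPossiveisDeAtaques = []
--     for k in range(len(indexesAtaques)):
--         ataqueValue = findAtaqueValue(indexesAtaques, ataques, k)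
--         valoresPossiveisDeAtaques.append(ataqueValue)
--     valoresPossiveisDeAtaquesCopy = copy.deepcopy(valoresPossiveisDeAtaques)
--     valoresPossiveisDeAtaquesCopy.sort()
--     maxAtaque = valoresPossiveisDeAtaquesCopy[-1]
--     index = valoresPossiveisDeAtaques.index(maxAtaque)
--     bestIndexInAtaques = indexesAtaques[index]
--     return maxAtaque, bestIndexInAtaques
-- ===== SOURCE B (Python) =====
-- def findMaxAtaque(indexesAtaques, ataques):
--     # single pass with a running best (strict > keeps the first maximum, like .index())
--     def attackValue(index):
--         return sum(ataques[i][r] for i, r in enumerate(index) if r is not None)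
--
--     if not indexesAtaques:
--         raise IndexError("empty list of attack index sets")
--     bestValue = attackValue(indexesAtaques[0])
--     bestK = 0
--     for k in range(1, len(indexesAtaques)):
--         v = attackValue(indexesAtaques[k])
--         if v > bestValue:
--             bestValue, bestK = v, k
--     return bestValue, indexesAtaques[bestK]
-- ===== Notes on version B (the rewrite author's own statement) =====
-- stated objective: simpler
-- what changed: Replaces A's build-all-values list + deepcopy + sort + [-1] + .index() pipeline with a single pass keeping a running best value and best position (strict > preserves the first-maximum tie-break).
import Mathlib
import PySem

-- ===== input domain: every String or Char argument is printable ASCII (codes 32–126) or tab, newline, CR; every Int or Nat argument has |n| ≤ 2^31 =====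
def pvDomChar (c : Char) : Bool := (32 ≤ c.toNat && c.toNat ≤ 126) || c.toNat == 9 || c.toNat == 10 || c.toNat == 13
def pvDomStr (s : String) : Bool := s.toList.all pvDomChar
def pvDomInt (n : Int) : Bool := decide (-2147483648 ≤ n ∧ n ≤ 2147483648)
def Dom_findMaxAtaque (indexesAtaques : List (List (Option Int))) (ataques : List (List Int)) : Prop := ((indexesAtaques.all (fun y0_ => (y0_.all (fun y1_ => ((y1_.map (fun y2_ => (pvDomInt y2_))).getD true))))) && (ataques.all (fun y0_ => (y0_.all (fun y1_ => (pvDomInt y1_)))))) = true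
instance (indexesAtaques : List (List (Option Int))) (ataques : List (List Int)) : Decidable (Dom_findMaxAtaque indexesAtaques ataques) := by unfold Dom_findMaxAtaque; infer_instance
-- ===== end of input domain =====

-- B replaces A's build-all-values + deepcopy + sort + [-1] + .index() pipeline with one pass
-- keeping a running best value and best position (objective: simpler).

-- ===== PORT A =====
-- findAtaqueValue(indexesAtaques, ataques, k): 'if r or r==0' on r : Option Int is exactly 'r is not None',
-- ported as the match on the Option. pyGetD defaults are only reached outside Pre_findMaxAtaque.
def pvFindAtaqueValue (indexesAtaques : List (List (Option Int))) (ataques : List (List Int)) (k : Int) : Int :=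
  let index := PySem.List.pyGetD indexesAtaques k []
  (PySem.List.pyRange 0 index.length 1).foldl (fun ataqueValue i =>
    match PySem.List.pyGetD index i none with
    | some r => ataqueValue + PySem.List.pyGetD (PySem.List.pyGetD ataques i []) r 0
    | none => ataqueValue) 0

def findMaxAtaque (indexesAtaques : List (List (Option Int))) (ataques : List (List Int)) : Int × List (Option Int) :=
  let valoresPossiveisDeAtaques :=
    (PySem.List.pyRange 0 indexesAtaques.length 1).map (fun k => pvFindAtaqueValue indexesAtaques ataques k)
  let valoresPossiveisDeAtaquesCopy := PySem.List.sorted valoresPossiveisDeAtaques (fun x => x) false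
  let maxAtaque := PySem.List.pyGetD valoresPossiveisDeAtaquesCopy (-1) 0    -- [-1]: IndexError (outside Pre_) iff the list is empty
  let index := (PySem.List.index? valoresPossiveisDeAtaques maxAtaque).getD 0
  let bestIndexInAtaques := PySem.List.pyGetD indexesAtaques (index : Int) []
  (maxAtaque, bestIndexInAtaques)

-- ===== PORT B =====
-- attackValue(index) = sum(ataques[i][r] for i, r in enumerate(index) if r is not None)
def pvAttackValue (ataques : List (List Int)) (index : List (Option Int)) : Int :=
  (PySem.List.enumerate index).foldl (fun acc p =>
    match p.2 with
    | some r => acc + PySem.List.pyGetD (PySem.List.pyGetD ataques p.1 []) r 0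
    | none => acc) 0

-- the loop body: 'if v > bestValue: bestValue, bestK = v, k'
def pvStep (ataques : List (List Int)) (b : Int × Int) (p : Int × List (Option Int)) : Int × Int :=
  let v := pvAttackValue ataques p.2
  if v > b.1 then (v, p.1) else b

def findMaxAtaque_alt (indexesAtaques : List (List (Option Int))) (ataques : List (List Int)) : Int × List (Option Int) :=
  match indexesAtaques with
  | [] => (0, [])    -- B raises IndexError here, like A (outside Pre_)
  | first :: rest =>
    let best := (PySem.List.enumerate rest 1).foldl (pvStep ataques) (pvAttackValue ataques first, 0)
    (best.1, PySem.List.pyGetD (first :: rest) best.2 [])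

-- ===== PRECONDITION & SPEC =====
-- Pre_ excludes only inputs where both Pythons raise IndexError: an empty indexesAtaques
-- (A's sortedCopy[-1]), and any non-None entry r at position i of some index list with
-- i ≥ len(ataques) or r out of Python range for ataques[i].
def Pre_findMaxAtaque (indexesAtaques : List (List (Option Int))) (ataques : List (List Int)) : Prop :=
  indexesAtaques ≠ [] ∧
  ∀ index ∈ indexesAtaques, ∀ p ∈ index.zipIdx, ∀ r : Int, p.1 = some r →
    p.2 < ataques.length ∧ PySem.Raise.InRange (ataques.getD p.2 []).length r
instance (indexesAtaques : List (List (Option Int))) (ataques : List (List Int)) : Decidable (Pre_findMaxAtaque indexesAtaques ataques) := by unfold Pre_findMaxAtaque; infer_instance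

def pvWitness_findMaxAtaque : List (List (Option Int)) × List (List Int) :=
  ([[some 1, none], [some 0, some (-1)]], [[3, 4], [5]])

def Spec_findMaxAtaque (indexesAtaques : List (List (Option Int))) (ataques : List (List Int)) (out : Int × List (Option Int)) : Prop := out = findMaxAtaque_alt indexesAtaques ataques
instance (indexesAtaques : List (List (Option Int))) (ataques : List (List Int)) (out : Int × List (Option Int)) : Decidable (Spec_findMaxAtaque indexesAtaques ataques out) := by unfold Spec_findMaxAtaque; infer_instance

-- ===== CLAIM (what is proved, stated in full; the proofs are below) =====
def Claim_equal_findMaxAtaque : Prop := ∀ (indexesAtaques : List (List (Option Int))) (ataques : List (List Int)), Dom_findMaxAtaque indexesAtaques ataques → Pre_findMaxAtaque indexesAtaques ataques → Spec_findMaxAtaque indexesAtaques ataques (findMaxAtaque indexesAtaques ataques)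

-- ===== LEMMAS AND PROOFS =====

-- A's inner index loop computes B's attackValue of the same index list
theorem pv_inner (ataques : List (List Int)) (index : List (Option Int)) :
    (PySem.List.pyRange 0 index.length 1).foldl (fun ataqueValue i =>
      match PySem.List.pyGetD index i none with
      | some r => ataqueValue + PySem.List.pyGetD (PySem.List.pyGetD ataques i []) r 0
      | none => ataqueValue) 0 = pvAttackValue ataques index := by
  unfold pvAttackValue
  rw [PySem.List.enumerate_eq_map_pyRange index none, List.foldl_map, PySem.List.len_eq]

-- A's list of candidate values is the per-candidate map of B's attackValue
theorem pv_values_eq (indexesAtaques : List (List (Option Int))) (ataques : List (List Int)) :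
    (PySem.List.pyRange 0 indexesAtaques.length 1).map (fun k => pvFindAtaqueValue indexesAtaques ataques k)
      = indexesAtaques.map (pvAttackValue ataques) := by
  conv_rhs => rw [← PySem.List.map_pyGetD_pyRange_zero indexesAtaques []]
  rw [List.map_map, PySem.List.len_eq]
  apply List.map_congr_left
  intro k _
  show pvFindAtaqueValue indexesAtaques ataques k = _
  unfold pvFindAtaqueValue
  exact pv_inner ataques (PySem.List.pyGetD indexesAtaques k [])

-- running strict-> max over enumerate: the value is the running max, the index is the
-- position of its FIRST occurrence (when it improves on the seed)
theorem pv_runmax (ws : List Int) (s bv bk : Int) :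
    (PySem.List.enumerate ws s).foldl
        (fun (b : Int × Int) p => if p.2 > b.1 then (p.2, p.1) else b) (bv, bk)
      = (ws.foldl max bv,
         if ws.foldl max bv > bv then
           s + (((PySem.List.index? ws (ws.foldl max bv)).getD 0 : Nat) : Int)
         else bk) := by
  induction ws generalizing s bv bk with
  | nil => simp [PySem.List.enumerate_nil]
  | cons w t ih =>
    rw [PySem.List.enumerate_cons, List.foldl_cons, List.foldl_cons]
    by_cases hw : w > bv
    · simp only [if_pos hw]
      rw [ih]
      have hmax : max bv w = w := by omega
      have hle := PySem.List.le_foldl_max t w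
      have hMbv : t.foldl max w > bv := by omega
      rw [hmax]
      by_cases hM : t.foldl max w > w
      · have hmem : t.foldl max w ∈ t := by
          rcases PySem.List.foldl_max_mem t w with h | h
          · omega
          · exact h
        have hsome : (PySem.List.index? t (t.foldl max w)).isSome = true :=
          (PySem.List.index?_isSome_iff t _).mpr hmem
        obtain ⟨k, hk⟩ := Option.isSome_iff_exists.mp hsome
        have hne : w ≠ t.foldl max w := by omega
        rw [if_pos hM, if_pos hMbv, PySem.List.index?_cons_of_ne t hne, hk]
        simp only [Option.map_some, Option.getD_some]
        congr 1
        push_cast; ring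
      · have hMw : t.foldl max w = w := by omega
        rw [if_neg hM, if_pos hMbv, hMw, PySem.List.index?_cons_self]
        simp
    · simp only [if_neg hw]
      rw [ih]
      have hmax : max bv w = bv := by omega
      rw [hmax]
      by_cases hM : t.foldl max bv > bv
      · have hmem : t.foldl max bv ∈ t := by
          rcases PySem.List.foldl_max_mem t bv with h | h
          · omega
          · exact h
        have hsome : (PySem.List.index? t (t.foldl max bv)).isSome = true :=
          (PySem.List.index?_isSome_iff t _).mpr hmem
        obtain ⟨k, hk⟩ := Option.isSome_iff_exists.mp hsome
        have hne : w ≠ t.foldl max bv := by omega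
        rw [if_pos hM, if_pos hM, PySem.List.index?_cons_of_ne t hne, hk]
        simp only [Option.map_some, Option.getD_some]
        congr 1
        push_cast; ring
      · rw [if_neg hM, if_neg hM]

-- every member of a ≤-pairwise list is at most its last element
theorem pv_mem_le_getLast (l : List Int) (h : l.Pairwise (· ≤ ·)) (hne : l ≠ []) :
    ∀ x ∈ l, x ≤ l.getLast hne := by
  induction l with
  | nil => simp
  | cons a t ih =>
    intro x hx
    rcases List.mem_cons.mp hx with rfl | hxt
    · cases t with
      | nil => simp
      | cons b u =>
        have hlast : (b :: u).getLast (by simp) ∈ b :: u := List.getLast_mem _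
        have := (List.pairwise_cons.mp h).1 _ hlast
        simpa [List.getLast_cons] using this
    · cases t with
      | nil => simp at hxt
      | cons b u =>
        have := ih (List.pairwise_cons.mp h).2 (by simp) x hxt
        simpa [List.getLast_cons] using this

-- sortedCopy[-1] is the running max of the values
theorem pv_last_sorted (v : Int) (t : List Int) :
    PySem.List.pyGetD (PySem.List.sorted (v :: t) (fun x => x) false) (-1) 0
      = t.foldl max v := by
  have hne : PySem.List.sorted (v :: t) (fun x => x) false ≠ [] := by
    rw [Ne, PySem.List.sorted_eq_nil_iff]; simp
  rw [PySem.List.pyGetD_neg_one _ _ hne]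
  set l := PySem.List.sorted (v :: t) (fun x => x) false with hl
  have hperm := PySem.List.sorted_perm (v :: t) (fun x => x) false
  have hpw : l.Pairwise (· ≤ ·) := PySem.List.sorted_pairwise (v :: t) (fun x => x)
  have hmem_iff : ∀ x, x ∈ l ↔ x ∈ v :: t := fun x => hperm.mem_iff
  have hlastmem : l.getLast hne ∈ v :: t := (hmem_iff _).mp (List.getLast_mem hne)
  have hle := PySem.List.le_foldl_max t v
  apply le_antisymm
  · rcases List.mem_cons.mp hlastmem with h | h
    · rw [h]; exact hle.1
    · exact hle.2 _ h
  · have hFmem : t.foldl max v ∈ l := by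
      rw [hmem_iff]
      rcases PySem.List.foldl_max_mem t v with h | h
      · rw [h]; exact List.mem_cons_self
      · exact List.mem_cons_of_mem _ h
    exact pv_mem_le_getLast l hpw hne _ hFmem

-- the B fold over (index, candidate) pairs is the pure fold over the value list
theorem pv_enum_map (ataques : List (List Int)) (xs : List (List (Option Int))) (s : Int) (b : Int × Int) :
    (PySem.List.enumerate xs s).foldl (pvStep ataques) b
      = (PySem.List.enumerate (xs.map (pvAttackValue ataques)) s).foldl
          (fun (b : Int × Int) p => if p.2 > b.1 then (p.2, p.1) else b) b := by
  induction xs generalizing s b with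
  | nil => simp [PySem.List.enumerate_nil]
  | cons x t ih =>
    simp only [List.map_cons, PySem.List.enumerate_cons, List.foldl_cons, pvStep]
    exact ih _ _

-- the .index() of the max in (v :: t) = 0 when the head already attains it, else 1 + its first position in t
theorem pv_index_eq (v : Int) (t : List Int) :
    (((PySem.List.index? (v :: t) (t.foldl max v)).getD 0 : Nat) : Int)
      = if t.foldl max v > v then 1 + (((PySem.List.index? t (t.foldl max v)).getD 0 : Nat) : Int) else 0 := by
  by_cases h : t.foldl max v > v
  · have hmem : t.foldl max v ∈ t := by
      rcases PySem.List.foldl_max_mem t v with h' | h'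
      · omega
      · exact h'
    obtain ⟨k, hk⟩ := Option.isSome_iff_exists.mp ((PySem.List.index?_isSome_iff t _).mpr hmem)
    have hne : v ≠ t.foldl max v := by omega
    rw [if_pos h, PySem.List.index?_cons_of_ne t hne, hk]
    simp only [Option.map_some, Option.getD_some]
    push_cast; ring
  · have heq : t.foldl max v = v := le_antisymm (by omega) (PySem.List.le_foldl_max t v).1
    rw [if_neg h, heq, PySem.List.index?_cons_self]
    simp

-- ===== VERDICT (by name: the statement is the Claim_ definition above) =====
theorem findMaxAtaque_spec : Claim_equal_findMaxAtaque := by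
  intro indexesAtaques ataques _ hpre
  obtain ⟨hne, -⟩ := hpre
  unfold Spec_findMaxAtaque
  obtain ⟨first, rest, rfl⟩ : ∃ f r, indexesAtaques = f :: r := by
    cases indexesAtaques with
    | nil => exact absurd rfl hne
    | cons f r => exact ⟨f, r, rfl⟩
  unfold findMaxAtaque findMaxAtaque_alt
  dsimp only
  rw [pv_values_eq, pv_enum_map ataques rest 1 _, pv_runmax]
  simp only [List.map_cons]
  rw [pv_last_sorted, pv_index_eq]
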